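-- pv_equiv track=rewrite | github.com/lkndy/lr1-visualizer | backend/parser/grammar.py | _tokenize_rhs
-- ===== SOURCE A (Python) =====
-- def _tokenize_rhs(rhs: str) -> list[str]:
--     """Tokenize the right-hand side of a production."""
--     # Simple tokenization - split on whitespace, handle parentheses
--     tokens = []
--     current_token = ""
--
--     for char in rhs:
--         if char.isspace():
--             if current_token:
--                 tokens.append(current_token)
--                 current_token = ""
--         elif char in "()[]{}":
--             if current_token:
--                 tokens.append(current_token)
--                 current_token = ""
--             tokens.append(char)
--         else:
--             current_token += char
--
--     if current_token:
--         tokens.append(current_token)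
--
--     return tokens
-- ===== SOURCE B (Python) =====
-- import re
--
-- _TOKEN_RE = re.compile(r'[()\[\]{}]|[^\s()\[\]{}]+')
--
-- def _tokenize_rhs(rhs: str) -> list[str]:
--     """Tokenize the right-hand side of a production (single regex scan)."""
--     return _TOKEN_RE.findall(rhs)
-- ===== Notes on version B (the rewrite author's own statement) =====
-- stated objective: idiomatic
-- what changed: Replaced the explicit per-character loop with accumulator string and append logic by a single compiled-regex scan (re.findall with an alternation: one bracket char, or a maximal run of non-space non-bracket chars).
import Mathlib
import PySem

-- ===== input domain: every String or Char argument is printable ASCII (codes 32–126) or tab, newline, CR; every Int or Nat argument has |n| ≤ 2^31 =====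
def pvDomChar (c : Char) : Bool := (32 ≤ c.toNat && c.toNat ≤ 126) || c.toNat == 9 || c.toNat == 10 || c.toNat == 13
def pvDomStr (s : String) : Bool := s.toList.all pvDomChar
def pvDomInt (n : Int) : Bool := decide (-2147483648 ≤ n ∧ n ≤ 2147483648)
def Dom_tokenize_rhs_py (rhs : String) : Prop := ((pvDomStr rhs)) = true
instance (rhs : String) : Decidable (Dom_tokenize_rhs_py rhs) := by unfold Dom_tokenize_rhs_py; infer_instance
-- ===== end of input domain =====

-- B replaces A's char-by-char accumulator loop by a single regex scan
-- (re.findall(r'[()\[\]{}]|[^\s()\[\]{}]+', rhs)); ported as a maximal-munch scanner. Objective: idiomatic.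

-- ===== PORT A =====
-- 'char in "()[]{}"'
def pvBrk (c : Char) : Bool := "()[]{}".toList.contains c

-- the body of A's for-loop: state = (tokens, current_token as List Char)
def pvStepA (st : List String × List Char) (c : Char) : List String × List Char :=
  if PySem.Chars.isspace c then
    (if st.2 ≠ [] then st.1 ++ [String.mk st.2] else st.1, [])
  else if pvBrk c then
    ((if st.2 ≠ [] then st.1 ++ [String.mk st.2] else st.1) ++ [String.mk [c]], [])
  else
    (st.1, st.2 ++ [c])

-- the trailing 'if current_token: tokens.append(current_token)'
def pvFinA (st : List String × List Char) : List String :=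
  if st.2 ≠ [] then st.1 ++ [String.mk st.2] else st.1

def tokenize_rhs_py (rhs : String) : List String :=
  pvFinA (rhs.toList.foldl pvStepA ([], []))

-- ===== PORT B =====
-- a character matched by the regex atom [^\s()\[\]{}]  (on the ASCII domain, \s = isspace)
def pvOk (c : Char) : Bool := !PySem.Chars.isspace c && !pvBrk c

-- PySem has no regex: hand port of re.findall(r'[()\[\]{}]|[^\s()\[\]{}]+', ·) — the
-- engine skips a char matching neither alternative, emits a single bracket, or takes a
-- maximal run of non-space non-bracket chars; exact on the ASCII domain.
def pvScanB : List Char → List String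
  | [] => []
  | c :: cs =>
    if PySem.Chars.isspace c then pvScanB cs
    else if pvBrk c then String.mk [c] :: pvScanB cs
    else String.mk (c :: cs.takeWhile pvOk) :: pvScanB (cs.dropWhile pvOk)
termination_by cs => cs.length
decreasing_by
  · simp
  · simp
  · exact Nat.lt_succ_of_le (List.length_dropWhile_le pvOk cs)

def tokenize_rhs_py_alt (rhs : String) : List String := pvScanB rhs.toList

-- ===== PRECONDITION & SPEC =====
def Spec_tokenize_rhs_py (rhs : String) (out : List String) : Prop := out = tokenize_rhs_py_alt rhs
instance (rhs : String) (out : List String) : Decidable (Spec_tokenize_rhs_py rhs out) := by unfold Spec_tokenize_rhs_py; infer_instance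

-- ===== CLAIM (what is proved, stated in full; the proofs are below) =====
def Claim_equal_tokenize_rhs_py : Prop := ∀ (rhs : String), Dom_tokenize_rhs_py rhs → Spec_tokenize_rhs_py rhs (tokenize_rhs_py rhs)

-- ===== LEMMAS AND PROOFS =====

-- one step from (ts, cur) only appends to ts
theorem pvStepA_extract (ts : List String) (cur : List Char) (c : Char) :
    pvStepA (ts, cur) c = (ts ++ (pvStepA ([], cur) c).1, (pvStepA ([], cur) c).2) := by
  simp only [pvStepA]
  split_ifs <;> simp

-- the whole loop from (ts, cur) only appends to ts
theorem pvFoldA_extract (cs : List Char) (ts : List String) (cur : List Char) :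
    cs.foldl pvStepA (ts, cur) =
      (ts ++ (cs.foldl pvStepA ([], cur)).1, (cs.foldl pvStepA ([], cur)).2) := by
  induction cs generalizing ts cur with
  | nil => simp
  | cons c cs ih =>
    simp only [List.foldl_cons]
    rw [pvStepA_extract ts cur c,
        ih (ts ++ (pvStepA ([], cur) c).1) (pvStepA ([], cur) c).2,
        ih (pvStepA ([], cur) c).1 (pvStepA ([], cur) c).2]
    simp

-- B's scanner on a block of all-ok chars followed by a rest that does not start ok
theorem pvScanB_block (d : Char) (ds rest : List Char)
    (hok : ∀ c ∈ d :: ds, pvOk c = true)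
    (hrest : rest.takeWhile pvOk = [] ∧ rest.dropWhile pvOk = rest) :
    pvScanB (d :: ds ++ rest) = String.mk (d :: ds) :: pvScanB rest := by
  have hd := hok d (by simp)
  have hds : ∀ c ∈ ds, pvOk c = true := fun c hc => hok c (by simp [hc])
  have hsp : PySem.Chars.isspace d = false := by
    cases h : PySem.Chars.isspace d <;> simp [pvOk, h] at hd ⊢
  have hbr : pvBrk d = false := by
    cases h : pvBrk d <;> simp [pvOk, h] at hd ⊢
  rw [List.cons_append, pvScanB, if_neg (by simp [hsp]), if_neg (by simp [hbr]),
      List.takeWhile_append_of_pos hds, List.dropWhile_append_of_pos hds,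
      hrest.1, hrest.2, List.append_nil]

-- a rest that is empty or starts with a non-ok char
theorem pvRest_nonok (rest : List Char)
    (h : rest = [] ∨ ∃ c cs, rest = c :: cs ∧ pvOk c = false) :
    rest.takeWhile pvOk = [] ∧ rest.dropWhile pvOk = rest := by
  rcases h with h | ⟨c, cs, rfl, hc⟩
  · simp [h]
  · simp [List.takeWhile, List.dropWhile, hc]

-- main invariant: the loop started with pending all-ok token cur equals the scanner on cur ++ cs
theorem pvMain (cs : List Char) : ∀ cur : List Char, (∀ c ∈ cur, pvOk c = true) →
    pvFinA (cs.foldl pvStepA ([], cur)) = pvScanB (cur ++ cs) := by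
  induction cs with
  | nil =>
    intro cur hcur
    cases cur with
    | nil => simp [pvFinA, pvScanB]
    | cons d ds =>
      have hb : pvScanB (d :: ds ++ []) = String.mk (d :: ds) :: pvScanB [] :=
        pvScanB_block d ds [] hcur (by simp)
      simp only [List.append_nil] at hb
      rw [List.foldl_nil, List.append_nil, hb, pvScanB]
      simp [pvFinA]
  | cons c cs ih =>
    intro cur hcur
    simp only [List.foldl_cons]
    by_cases hsp : PySem.Chars.isspace c = true
    · have hstep : pvStepA ([], cur) c =
          ((if cur ≠ [] then ([] : List String) ++ [String.mk cur] else []), []) := by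
        simp [pvStepA, hsp]
      rw [hstep, pvFoldA_extract cs _ [], pvFinA]
      have hco : pvOk c = false := by simp [pvOk, hsp]
      have hfin : pvFinA (cs.foldl pvStepA ([], [])) = pvScanB cs := by
        have := ih [] (by simp)
        simpa using this
      have hscan_c : pvScanB (c :: cs) = pvScanB cs := by
        rw [pvScanB, if_pos hsp]
      cases cur with
      | nil =>
        simp only [ne_eq, not_true_eq_false, List.nil_append, hscan_c]
        simp only [pvFinA] at hfin ⊢
        split at hfin <;> simp_all [pvFinA]
      | cons d ds =>
        rw [pvScanB_block d ds (c :: cs) hcur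
              (pvRest_nonok _ (Or.inr ⟨c, cs, rfl, hco⟩)), hscan_c]
        simp only [pvFinA] at hfin ⊢
        split at hfin <;> simp_all
    · by_cases hbr : pvBrk c = true
      · have hstep : pvStepA ([], cur) c =
            ((if cur ≠ [] then ([] : List String) ++ [String.mk cur] else []) ++ [String.mk [c]], []) := by
          simp [pvStepA, hsp, hbr]
        rw [hstep, pvFoldA_extract cs _ []]
        have hco : pvOk c = false := by simp [pvOk, hbr]
        have hfin := ih [] (by simp)
        simp only [List.nil_append] at hfin
        have hscan_c : pvScanB (c :: cs) = String.mk [c] :: pvScanB cs := by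
          rw [pvScanB, if_neg (by simp [hsp]), if_pos hbr]
        cases cur with
        | nil =>
          simp only [ne_eq, not_true_eq_false, List.nil_append, hscan_c]
          simp only [pvFinA] at hfin ⊢
          split at hfin <;> simp_all [pvFinA]
        | cons d ds =>
          rw [pvScanB_block d ds (c :: cs) hcur
                (pvRest_nonok _ (Or.inr ⟨c, cs, rfl, hco⟩)), hscan_c]
          simp only [pvFinA] at hfin ⊢
          split at hfin <;> simp_all
      · have hstep : pvStepA ([], cur) c = ([], cur ++ [c]) := by
          simp [pvStepA, hsp, hbr]
        rw [hstep]
        have hok : ∀ x ∈ cur ++ [c], pvOk x = true := by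
          intro x hx
          rcases List.mem_append.1 hx with hx | hx
          · exact hcur x hx
          · simp at hx; subst hx; simp [pvOk, hsp, hbr]
        rw [ih (cur ++ [c]) hok]
        simp

-- ===== VERDICT (by name: the statement is the Claim_ definition above) =====
theorem tokenize_rhs_py_spec : Claim_equal_tokenize_rhs_py := by
  intro rhs _
  show tokenize_rhs_py rhs = tokenize_rhs_py_alt rhs
  unfold tokenize_rhs_py tokenize_rhs_py_alt
  simpa using pvMain rhs.toList [] (by simp)
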